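-- pv_equiv track=rewrite | github.com/LuciferL666/Python-Basic | For_Loop_Lab/06_vowels_sum.py | calculate_vowel_value
-- ===== SOURCE A (Python) =====
-- def calculate_vowel_value(text):
--     # Създаваме речник със стойностите на гласните букви
--     vowel_values = {'a': 1, 'e': 2, 'i': 3, 'o': 4, 'u': 5}
--
--     # Инициализираме сумата
--     total_sum = 0
--
--     # Преглеждаме всеки символ в текста
--     for char in text:
--         # Превръщаме символа в малка буква, за да се справим с главни букви
--         lower_char = char.lower()
--
--         # Ако символът е гласна буква, добавяме стойността му към сумата
--         if lower_char in vowel_values: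
--             total_sum += vowel_values[lower_char]
--
--     return total_sum
-- ===== SOURCE B (Python) =====
-- def calculate_vowel_value(text):
--     vowel_values = {'a': 1, 'e': 2, 'i': 3, 'o': 4, 'u': 5}
--     # tabulation pass: lowercase every character once
--     chars = [c.lower() for c in text]
--     # combination pass: five counted lookups instead of one accumulating scan
--     return sum(value * chars.count(vowel) for vowel, value in vowel_values.items())
-- ===== Notes on version B (the rewrite author's own statement) =====
-- stated objective: alternative
-- what changed: Replaces A's single accumulating character scan with a lowercasing tabulation pass followed by a separate combination pass that multiplies each vowel's value by its count in the text.
import Mathlib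
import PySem

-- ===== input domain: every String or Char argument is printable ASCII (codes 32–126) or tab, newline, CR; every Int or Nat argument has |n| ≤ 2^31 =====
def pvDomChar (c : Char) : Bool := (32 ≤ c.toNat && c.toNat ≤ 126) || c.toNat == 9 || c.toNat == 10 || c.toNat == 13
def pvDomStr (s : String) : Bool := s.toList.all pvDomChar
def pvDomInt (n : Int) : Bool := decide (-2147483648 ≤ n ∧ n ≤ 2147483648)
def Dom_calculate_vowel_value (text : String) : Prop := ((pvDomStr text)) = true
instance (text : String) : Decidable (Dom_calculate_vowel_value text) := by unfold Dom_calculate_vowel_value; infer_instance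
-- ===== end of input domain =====

-- B replaces A's single accumulating scan by a lowercasing pass plus a per-vowel counting pass (objective: alternative decomposition).

-- ===== PORT A =====
-- the vowel-value dict; keys are single characters, so Char keys are exact on String input
def pvVowelsA : PySem.Dict Char Int :=
  PySem.Dict.ofList [('a', 1), ('e', 2), ('i', 3), ('o', 4), ('u', 5)]

def calculate_vowel_value (text : String) : Int :=
  text.toList.foldl
    (fun total_sum char =>
      let lower_char := PySem.Chars.lowerChar char
      if pvVowelsA.contains lower_char then
        total_sum + pvVowelsA.getD lower_char 0
      else total_sum) 0

-- ===== PORT B =====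
def calculate_vowel_value_alt (text : String) : Int :=
  let chars := text.toList.map PySem.Chars.lowerChar
  ([('a', 1), ('e', 2), ('i', 3), ('o', 4), ('u', 5)] : List (Char × Int)).foldl
    (fun s kv => s + kv.2 * (PySem.List.count chars kv.1 : Int)) 0

-- ===== PRECONDITION & SPEC =====
def Spec_calculate_vowel_value (text : String) (out : Int) : Prop := out = calculate_vowel_value_alt text
instance (text : String) (out : Int) : Decidable (Spec_calculate_vowel_value text out) := by unfold Spec_calculate_vowel_value; infer_instance

-- ===== CLAIM (what is proved, stated in full; the proofs are below) =====
def Claim_equal_calculate_vowel_value : Prop := ∀ (text : String), Dom_calculate_vowel_value text → Spec_calculate_vowel_value text (calculate_vowel_value text)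

-- ===== LEMMAS AND PROOFS =====

-- A's per-character contribution, as a function
def pvGainA (c : Char) : Int :=
  if pvVowelsA.contains (PySem.Chars.lowerChar c) then pvVowelsA.getD (PySem.Chars.lowerChar c) 0 else 0

lemma foldl_gain (l : List Char) (a : Int) :
    l.foldl (fun s c => s + pvGainA c) a = a + (l.map pvGainA).sum := by
  induction l generalizing a with
  | nil => simp
  | cons c l ih => simp [ih]; ring

lemma stepA_eq (s : Int) (c : Char) :
    (let lower_char := PySem.Chars.lowerChar c;
     if pvVowelsA.contains lower_char then s + pvVowelsA.getD lower_char 0 else s)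
    = s + pvGainA c := by
  simp only [pvGainA]; split <;> simp

lemma gain_eq (c : Char) : pvGainA c =
    (if PySem.Chars.lowerChar c = 'a' then (1:Int) else 0)
  + (if PySem.Chars.lowerChar c = 'e' then 2 else 0)
  + (if PySem.Chars.lowerChar c = 'i' then 3 else 0)
  + (if PySem.Chars.lowerChar c = 'o' then 4 else 0)
  + (if PySem.Chars.lowerChar c = 'u' then 5 else 0) := by
  unfold pvGainA
  rw [show pvVowelsA = PySem.Dict.mk [('a',(1:Int)),('e',2),('i',3),('o',4),('u',5)] from by decide]
  simp [PySem.Dict.getD_eq_get?_getD, PySem.Dict.get?_mk_cons, PySem.Dict.contains_mk]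
  split_ifs <;> simp_all [eq_comm]

lemma key (l : List Char) :
    (l.map pvGainA).sum
      = 1 * ((l.map PySem.Chars.lowerChar).count 'a' : Int)
      + 2 * ((l.map PySem.Chars.lowerChar).count 'e' : Int)
      + 3 * ((l.map PySem.Chars.lowerChar).count 'i' : Int)
      + 4 * ((l.map PySem.Chars.lowerChar).count 'o' : Int)
      + 5 * ((l.map PySem.Chars.lowerChar).count 'u' : Int) := by
  induction l with
  | nil => simp
  | cons c l ih =>
    simp only [List.map_cons, List.sum_cons, List.count_cons, ih, gain_eq]
    have h : ∀ v : Char, ((if PySem.Chars.lowerChar c == v then 1 else 0) : Nat) =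
        (if PySem.Chars.lowerChar c = v then 1 else 0) := by intro v; simp
    push_cast [h]
    split_ifs <;> simp_all <;> ring

-- ===== VERDICT (by name: the statement is the Claim_ definition above) =====
theorem calculate_vowel_value_spec : Claim_equal_calculate_vowel_value := by
  intro text _
  unfold Spec_calculate_vowel_value calculate_vowel_value calculate_vowel_value_alt
  simp only [stepA_eq]
  rw [foldl_gain, key]
  simp [PySem.List.count_eq]
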